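-- pv_equiv track=rewrite | github.com/Kudito98/Codesignal-tasks | graphs-arcade/9-livingOnTheRoads/livingOnTheRoads.py | solution
-- ===== SOURCE A (Python) =====
-- def solution(roadRegister):
--     roReg = []
--     for i in range(len(roadRegister)):
--         for j in range(len(roadRegister)):
--             if roadRegister[i][j] == True and roadRegister[j][i] == True:
--                 if (j, i) not in roReg:
--                     roReg.append((i, j))
--
--     return [[i!=j and bool(set(i) & set(j)) for j in roReg] for i in roReg]
-- ===== SOURCE B (Python) =====
-- def solution(roadRegister):
--     n = len(roadRegister)
--     # phase 1: triangular scan -- each qualifying pair is met once, so no membership test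
--     roReg = []
--     for i in range(n):
--         for j in range(i, n):
--             if roadRegister[i][j] == True and roadRegister[j][i] == True:
--                 roReg.append((i, j))
--     m = len(roReg)
--     # phase 2: incidence index vertex -> edge indices, then mark pairs sharing a vertex
--     inc = [[] for _ in range(n)]
--     for idx, (a, b) in enumerate(roReg):
--         inc[a].append(idx)
--         if b != a:
--             inc[b].append(idx)
--     matrix = [[False] * m for _ in range(m)]
--     for ids in inc:
--         for p in ids:
--             for q in ids:
--                 if p != q:
--                     matrix[p][q] = True
--     return matrix
-- ===== Notes on version B (the rewrite author's own statement) =====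
-- stated objective: faster
-- what changed: B builds the edge list with a triangular scan (i<=j), eliminating A's inner '(j,i) not in roReg' membership scan, and replaces A's all-pairs set-intersection matrix by a vertex-to-incident-edge index whose groups mark the symmetric matrix entries.
import Mathlib
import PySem

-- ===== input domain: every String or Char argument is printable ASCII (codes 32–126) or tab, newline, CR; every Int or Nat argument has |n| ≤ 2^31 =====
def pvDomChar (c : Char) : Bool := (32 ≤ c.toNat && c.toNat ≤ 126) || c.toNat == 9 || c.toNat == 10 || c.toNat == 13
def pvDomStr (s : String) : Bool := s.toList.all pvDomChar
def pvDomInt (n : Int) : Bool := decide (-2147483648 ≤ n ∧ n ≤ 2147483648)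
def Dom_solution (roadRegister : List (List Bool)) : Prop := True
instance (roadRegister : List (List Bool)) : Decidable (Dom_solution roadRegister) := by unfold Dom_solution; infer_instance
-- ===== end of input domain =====

-- B replaces A's quadratic-with-inner-membership-scan edge build by a triangular scan, and the
-- all-pairs set-intersection matrix by a vertex→incident-edge index whose groups mark the matrix.

-- roadRegister[i][j] (in range under Pre_solution)
def pvCell (rr : List (List Bool)) (i j : Nat) : Bool := (rr.getD i []).getD j false

-- ===== PORT A =====
def solution (roadRegister : List (List Bool)) : List (List Bool) :=
  let n := roadRegister.length
  let roReg := (List.range n).foldl (fun acc i =>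
    (List.range n).foldl (fun acc j =>
      if pvCell roadRegister i j = true ∧ pvCell roadRegister j i = true then
        if (j, i) ∉ acc then acc ++ [(i, j)] else acc
      else acc) acc) ([] : List (Nat × Nat))
  roReg.map (fun e => roReg.map (fun f =>
    decide (e ≠ f) && !(PySem.Set.inter (PySem.Set.ofList [e.1, e.2]) (PySem.Set.ofList [f.1, f.2])).isEmpty))

-- ===== PORT B =====
-- inc[v].append(p)
def pvAppendAt (inc : List (List Nat)) (v p : Nat) : List (List Nat) :=
  inc.set v ((inc.getD v []) ++ [p])

-- matrix[p][q] = True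
def pvSet2 (M : List (List Bool)) (p q : Nat) : List (List Bool) :=
  M.set p ((M.getD p []).set q true)

def solution_alt (roadRegister : List (List Bool)) : List (List Bool) :=
  let n := roadRegister.length
  let roReg := (List.range n).foldl (fun acc i =>
    (List.range' i (n - i)).foldl (fun acc j =>
      if pvCell roadRegister i j = true ∧ pvCell roadRegister j i = true then
        acc ++ [(i, j)]
      else acc) acc) ([] : List (Nat × Nat))
  let m := roReg.length
  let inc := roReg.zipIdx.foldl (fun inc ep =>
    let inc1 := pvAppendAt inc ep.1.1 ep.2
    if ep.1.2 ≠ ep.1.1 then pvAppendAt inc1 ep.1.2 ep.2 else inc1) (List.replicate n ([] : List Nat))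
  inc.foldl (fun M ids =>
    ids.foldl (fun M p =>
      ids.foldl (fun M q => if p ≠ q then pvSet2 M p q else M) M) M)
    (List.replicate m (List.replicate m false))

-- ===== PRECONDITION & SPEC =====
-- Pre_: exactly the inputs where Python A returns — every row long enough for all n column reads
def Pre_solution (roadRegister : List (List Bool)) : Prop :=
  ∀ row ∈ roadRegister, roadRegister.length ≤ row.length
instance (roadRegister : List (List Bool)) : Decidable (Pre_solution roadRegister) := by unfold Pre_solution; infer_instance
def pvWitness_solution : List (List Bool) := [[true, true], [true, false]]

def Spec_solution (roadRegister : List (List Bool)) (out : List (List Bool)) : Prop := out = solution_alt roadRegister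
instance (roadRegister : List (List Bool)) (out : List (List Bool)) : Decidable (Spec_solution roadRegister out) := by unfold Spec_solution; infer_instance

-- ===== CLAIM =====
def Claim_equal_solution : Prop := ∀ (roadRegister : List (List Bool)), Dom_solution roadRegister → Pre_solution roadRegister → Spec_solution roadRegister (solution roadRegister)

-- ===== LEMMAS AND PROOFS =====

-- The symmetric edge condition and the canonical edge list (row-major, i ≤ j).
def pvCond (rr : List (List Bool)) (i j : Nat) : Bool := pvCell rr i j && pvCell rr j i

def pvRowUpto (rr : List (List Bool)) (i j : Nat) : List (Nat × Nat) :=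
  ((List.range' i (j - i)).filter (fun b => pvCond rr i b)).map (fun b => (i, b))

def pvEdges (rr : List (List Bool)) (k : Nat) : List (Nat × Nat) :=
  (List.range k).flatMap (fun i => pvRowUpto rr i rr.length)

lemma mem_pvRowUpto (rr : List (List Bool)) (i j : Nat) (e : Nat × Nat) :
    e ∈ pvRowUpto rr i j ↔ e.1 = i ∧ i ≤ e.2 ∧ e.2 < j ∧ pvCond rr i e.2 = true := by
  obtain ⟨a, b⟩ := e
  simp only [pvRowUpto, List.mem_map, List.mem_filter, List.mem_range'_1, Prod.mk.injEq]
  constructor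
  · rintro ⟨x, ⟨⟨hx1, hx2⟩, hc⟩, rfl, rfl⟩
    exact ⟨rfl, hx1, by omega, hc⟩
  · rintro ⟨rfl, h1, h2, hc⟩
    exact ⟨b, ⟨⟨h1, by omega⟩, hc⟩, rfl, rfl⟩

lemma mem_pvEdges (rr : List (List Bool)) (k : Nat) (e : Nat × Nat) :
    e ∈ pvEdges rr k ↔ e.1 < k ∧ e.1 ≤ e.2 ∧ e.2 < rr.length ∧ pvCond rr e.1 e.2 = true := by
  simp only [pvEdges, List.mem_flatMap, List.mem_range, mem_pvRowUpto]
  constructor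
  · rintro ⟨i, hi, rfl, h⟩; exact ⟨hi, h⟩
  · rintro ⟨h1, h2⟩; exact ⟨e.1, h1, rfl, h2⟩

lemma pvRowUpto_succ (rr : List (List Bool)) (i j : Nat) (h : i ≤ j) :
    pvRowUpto rr i (j + 1) =
      pvRowUpto rr i j ++ (if pvCond rr i j = true then [(i, j)] else []) := by
  unfold pvRowUpto
  rw [show j + 1 - i = (j - i) + 1 by omega, List.range'_concat,
    List.filter_append, List.map_append, show i + 1 * (j - i) = j by omega]
  split_ifs with hc <;> simp [hc]

lemma pvEdges_succ (rr : List (List Bool)) (k : Nat) :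
    pvEdges rr (k + 1) = pvEdges rr k ++ pvRowUpto rr k rr.length := by
  simp [pvEdges, List.range_succ]

lemma pvFoldlFixed {α β : Type} (f : β → α → β) (a : β) (l : List α)
    (h : ∀ x ∈ l, f a x = a) : l.foldl f a = a := by
  induction l with
  | nil => rfl
  | cons x xs ih =>
    rw [List.foldl_cons, h x (by simp)]
    exact ih (fun y hy => h y (by simp [hy]))

-- ---------- phase 1, port A ----------

lemma A_inner_hi (rr : List (List Bool)) (i : Nat) (hi : i < rr.length) :
    ∀ (m j : Nat), i ≤ j → j + m ≤ rr.length →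
      (List.range' j m).foldl (fun acc j' =>
          if pvCell rr i j' = true ∧ pvCell rr j' i = true then
            if (j', i) ∉ acc then acc ++ [(i, j')] else acc
          else acc) (pvEdges rr i ++ pvRowUpto rr i j)
        = pvEdges rr i ++ pvRowUpto rr i (j + m) := by
  intro m
  induction m with
  | zero => intro j _ _; simp
  | succ m ih =>
    intro j hij hjm
    rw [List.range'_succ, List.foldl_cons]
    have hnotmem : (j, i) ∉ pvEdges rr i ++ pvRowUpto rr i j := by
      intro hmem
      rcases List.mem_append.mp hmem with h | h
      · have := (mem_pvEdges rr i (j, i)).mp h; omega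
      · have := (mem_pvRowUpto rr i j (j, i)).mp h; omega
    have hstep : (if pvCell rr i j = true ∧ pvCell rr j i = true then
        if (j, i) ∉ pvEdges rr i ++ pvRowUpto rr i j then
          (pvEdges rr i ++ pvRowUpto rr i j) ++ [(i, j)]
        else pvEdges rr i ++ pvRowUpto rr i j
      else pvEdges rr i ++ pvRowUpto rr i j) = pvEdges rr i ++ pvRowUpto rr i (j + 1) := by
      by_cases hc : pvCell rr i j = true ∧ pvCell rr j i = true
      · rw [if_pos hc, if_pos hnotmem, pvRowUpto_succ rr i j hij, List.append_assoc]
        congr 1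
        rw [if_pos (by simp [pvCond, hc.1, hc.2])]
      · rw [if_neg hc, pvRowUpto_succ rr i j hij]
        have : pvCond rr i j ≠ true := fun hT => hc (by simpa [pvCond] using hT)
        simp [this]
    rw [hstep]
    have := ih (j + 1) (by omega) (by omega)
    rw [this, show j + 1 + m = j + (m + 1) by omega]

lemma A_row (rr : List (List Bool)) (i : Nat) (hi : i < rr.length) :
    (List.range rr.length).foldl (fun acc j =>
        if pvCell rr i j = true ∧ pvCell rr j i = true then
          if (j, i) ∉ acc then acc ++ [(i, j)] else acc
        else acc) (pvEdges rr i)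
      = pvEdges rr (i + 1) := by
  have hsplit : List.range rr.length = List.range' 0 i ++ List.range' i (rr.length - i) := by
    rw [List.range_eq_range']
    rw [show List.range' i (rr.length - i) = List.range' (0 + 1 * i) (rr.length - i) by simp]
    rw [List.range'_append, show i + (rr.length - i) = rr.length by omega]
  rw [hsplit, List.foldl_append]
  have hfix : (List.range' 0 i).foldl (fun acc j =>
      if pvCell rr i j = true ∧ pvCell rr j i = true then
        if (j, i) ∉ acc then acc ++ [(i, j)] else acc
      else acc) (pvEdges rr i) = pvEdges rr i := by
    apply pvFoldlFixed
    intro j hj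
    rw [List.mem_range'_1] at hj
    by_cases hc : pvCell rr i j = true ∧ pvCell rr j i = true
    · rw [if_pos hc, if_neg]
      simp only [not_not]
      exact (mem_pvEdges rr i (j, i)).mpr
        ⟨by omega, by omega, hi, by simp [pvCond, hc.1, hc.2]⟩
    · rw [if_neg hc]
  rw [hfix]
  have := A_inner_hi rr i hi (rr.length - i) i (le_refl i) (by omega)
  rw [show pvRowUpto rr i i = [] by simp [pvRowUpto], List.append_nil] at this
  rw [this, show i + (rr.length - i) = rr.length by omega, pvEdges_succ]

lemma A_outer (rr : List (List Bool)) :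
    ∀ (m k : Nat), k + m ≤ rr.length →
      (List.range' k m).foldl (fun acc i =>
          (List.range rr.length).foldl (fun acc j =>
            if pvCell rr i j = true ∧ pvCell rr j i = true then
              if (j, i) ∉ acc then acc ++ [(i, j)] else acc
            else acc) acc) (pvEdges rr k)
        = pvEdges rr (k + m) := by
  intro m
  induction m with
  | zero => intro k _; simp
  | succ m ih =>
    intro k hk
    rw [List.range'_succ, List.foldl_cons, A_row rr k (by omega)]
    have := ih (k + 1) (by omega)
    rw [this, show k + 1 + m = k + (m + 1) by omega]

lemma edges_A (rr : List (List Bool)) :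
    (List.range rr.length).foldl (fun acc i =>
        (List.range rr.length).foldl (fun acc j =>
          if pvCell rr i j = true ∧ pvCell rr j i = true then
            if (j, i) ∉ acc then acc ++ [(i, j)] else acc
          else acc) acc) ([] : List (Nat × Nat))
      = pvEdges rr rr.length := by
  have := A_outer rr rr.length 0 (by omega)
  rw [← List.range_eq_range'] at this
  simpa [pvEdges] using this

-- ---------- phase 1, port B ----------

lemma B_row (rr : List (List Bool)) (i : Nat) (acc : List (Nat × Nat)) :
    (List.range' i (rr.length - i)).foldl (fun acc j =>
        if pvCell rr i j = true ∧ pvCell rr j i = true then acc ++ [(i, j)] else acc) acc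
      = acc ++ pvRowUpto rr i rr.length := by
  unfold pvRowUpto
  rw [← PySem.List.foldl_append_if (fun j => pvCond rr i j) (fun j => (i, j))
    (List.range' i (rr.length - i)) acc]
  apply PySem.List.foldl_congr_mem
  intro a x _
  by_cases hc : pvCell rr i x = true ∧ pvCell rr x i = true
  · rw [if_pos hc, if_pos (by simp [pvCond, hc.1, hc.2])]
  · rw [if_neg hc, if_neg (by simp only [pvCond, Bool.and_eq_true]; exact hc)]

lemma edges_B (rr : List (List Bool)) :
    (List.range rr.length).foldl (fun acc i =>
        (List.range' i (rr.length - i)).foldl (fun acc j =>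
          if pvCell rr i j = true ∧ pvCell rr j i = true then acc ++ [(i, j)] else acc) acc)
        ([] : List (Nat × Nat))
      = pvEdges rr rr.length := by
  have hcongr : ∀ (acc : List (Nat × Nat)) (i : Nat), i ∈ List.range rr.length →
      (List.range' i (rr.length - i)).foldl (fun acc j =>
        if pvCell rr i j = true ∧ pvCell rr j i = true then acc ++ [(i, j)] else acc) acc
      = acc ++ pvRowUpto rr i rr.length := fun acc i _ => B_row rr i acc
  rw [PySem.List.foldl_congr_mem (List.range rr.length) _
      (fun acc i => acc ++ pvRowUpto rr i rr.length) [] hcongr,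
    PySem.List.foldl_append_eq_flatMap (fun i => pvRowUpto rr i rr.length)]
  simp [pvEdges]

-- ---------- edge list properties ----------

lemma nodup_pvEdges (rr : List (List Bool)) : (pvEdges rr rr.length).Nodup := by
  rw [pvEdges, List.nodup_flatMap]
  constructor
  · intro i _
    apply List.Nodup.map
    · intro a b hab; simpa using hab
    · exact (List.nodup_range').filter _
  · apply List.Pairwise.imp_of_mem ?_ (List.nodup_range)
    intro a b ha hb hne
    intro e hea heb
    have h1 := (mem_pvRowUpto rr a _ e).mp hea
    have h2 := (mem_pvRowUpto rr b _ e).mp heb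
    omega

-- ---------- incidence lists (port B phase 2a) ----------

lemma length_pvAppendAt (inc : List (List Nat)) (v p : Nat) :
    (pvAppendAt inc v p).length = inc.length := List.length_set

lemma pvGetD_set {α : Type} (l : List α) (i j : Nat) (x d : α) :
    (l.set i x).getD j d = if i = j ∧ i < l.length then x else l.getD j d := by
  rw [List.getD_eq_getElem?_getD, List.getElem?_set]
  by_cases hij : i = j
  · subst hij
    by_cases hlen : i < l.length
    · simp [hlen]
    · rw [if_pos rfl, if_neg hlen, Option.getD_none, if_neg (by tauto),
        List.getD_eq_getElem?_getD, List.getElem?_eq_none_iff.mpr (by omega), Option.getD_none]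
  · rw [if_neg hij, if_neg (by tauto), ← List.getD_eq_getElem?_getD]

lemma mem_getD_pvAppendAt (inc : List (List Nat)) (a idx v q : Nat) :
    q ∈ (pvAppendAt inc a idx).getD v [] ↔
      q ∈ inc.getD v [] ∨ (v = a ∧ a < inc.length ∧ q = idx) := by
  unfold pvAppendAt
  rw [pvGetD_set]
  by_cases h : a = v ∧ a < inc.length
  · obtain ⟨rfl, hlen⟩ := h
    rw [if_pos ⟨rfl, hlen⟩]
    simp [hlen]
  · rw [if_neg h]
    simp only [iff_self_or]
    rintro ⟨rfl, h2, _⟩; exact absurd ⟨rfl, h2⟩ h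

lemma inc_char (l : List (Nat × Nat)) :
    ∀ (k : Nat) (inc0 : List (List Nat)),
      (∀ e ∈ l, e.1 < inc0.length ∧ e.2 < inc0.length) →
      (((l.zipIdx k).foldl (fun inc ep =>
          let inc1 := pvAppendAt inc ep.1.1 ep.2
          if ep.1.2 ≠ ep.1.1 then pvAppendAt inc1 ep.1.2 ep.2 else inc1) inc0).length = inc0.length
       ∧ ∀ v q, q ∈ ((l.zipIdx k).foldl (fun inc ep =>
          let inc1 := pvAppendAt inc ep.1.1 ep.2
          if ep.1.2 ≠ ep.1.1 then pvAppendAt inc1 ep.1.2 ep.2 else inc1) inc0).getD v [] ↔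
            q ∈ inc0.getD v [] ∨
              ∃ i, ∃ h : i < l.length, q = k + i ∧ (l[i].1 = v ∨ l[i].2 = v)) := by
  induction l with
  | nil => intro k inc0 _; simp
  | cons e l ih =>
    intro k inc0 hlen
    rw [List.zipIdx_cons, List.foldl_cons]
    have he := hlen e (by simp)
    set inc1 := pvAppendAt inc0 e.1 k with hinc1
    set inc2 := (if e.2 ≠ e.1 then pvAppendAt inc1 e.2 k else inc1) with hinc2
    have hlen2 : inc2.length = inc0.length := by
      rw [hinc2]; split_ifs <;> simp [length_pvAppendAt, hinc1]
    have hmem2 : ∀ v q, q ∈ inc2.getD v [] ↔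
        q ∈ inc0.getD v [] ∨ (q = k ∧ (e.1 = v ∨ e.2 = v)) := by
      intro v q
      rw [hinc2]
      by_cases hee : e.2 = e.1
      · rw [if_neg (by simp [hee]), hinc1, mem_getD_pvAppendAt]
        constructor
        · rintro (h | ⟨rfl, _, rfl⟩)
          · left; exact h
          · right; exact ⟨rfl, Or.inl rfl⟩
        · rintro (h | ⟨rfl, h⟩)
          · left; exact h
          · right
            rcases h with h | h
            · exact ⟨h.symm, by omega, rfl⟩
            · rw [hee] at h; exact ⟨h.symm, by omega, rfl⟩
      · rw [if_pos hee, mem_getD_pvAppendAt, hinc1, mem_getD_pvAppendAt,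
          length_pvAppendAt]
        constructor
        · rintro ((h | ⟨rfl, _, rfl⟩) | ⟨rfl, _, rfl⟩)
          · left; exact h
          · right; exact ⟨rfl, Or.inl rfl⟩
          · right; exact ⟨rfl, Or.inr rfl⟩
        · rintro (h | ⟨rfl, h | h⟩)
          · left; left; exact h
          · left; right; exact ⟨h.symm, by omega, rfl⟩
          · right; exact ⟨h.symm, by omega, rfl⟩
    have hlen' : ∀ e' ∈ l, e'.1 < inc2.length ∧ e'.2 < inc2.length := by
      intro e' he'
      rw [hlen2]; exact hlen e' (by simp [he'])
    obtain ⟨ihlen, ihmem⟩ := ih (k + 1) inc2 hlen'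
    refine ⟨by rw [ihlen, hlen2], ?_⟩
    intro v q
    rw [ihmem v q, hmem2 v q]
    constructor
    · rintro ((h | ⟨rfl, h⟩) | ⟨i, hi, rfl, h⟩)
      · left; exact h
      · right; exact ⟨0, by simp, by omega, by simpa using h⟩
      · right; exact ⟨i + 1, by simpa using hi, by omega, by simpa using h⟩
    · rintro (h | ⟨i, hi, rfl, h⟩)
      · left; left; exact h
      · cases i with
        | zero => left; right; exact ⟨by omega, by simpa using h⟩
        | succ i =>
          right
          exact ⟨i, by simpa using hi, by omega, by simpa using h⟩

-- ---------- matrix (port B phase 2b) ----------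

def pvRead (M : List (List Bool)) (p q : Nat) : Bool := (M.getD p []).getD q false

def pvShape (M : List (List Bool)) (m : Nat) : Prop :=
  M.length = m ∧ ∀ row ∈ M, row.length = m

lemma getD_length_of_shape {M : List (List Bool)} {m : Nat} (h : pvShape M m)
    (p : Nat) (hp : p < m) : (M.getD p []).length = m := by
  rw [List.getD_eq_getElem?_getD, List.getElem?_eq_getElem (lt_of_lt_of_eq hp h.1.symm)]
  exact h.2 _ (List.getElem_mem _)

lemma shape_pvSet2 {M : List (List Bool)} {m : Nat} (h : pvShape M m)
    (a b : Nat) (ha : a < m) : pvShape (pvSet2 M a b) m := by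
  refine ⟨by simp [pvSet2, h.1], ?_⟩
  intro row hrow
  rcases List.mem_or_eq_of_mem_set hrow with h' | rfl
  · exact h.2 _ h'
  · rw [List.length_set]; exact getD_length_of_shape h a ha

lemma pvRead_pvSet2 {M : List (List Bool)} {m : Nat} (h : pvShape M m)
    (a b : Nat) (ha : a < m) (hb : b < m) (p q : Nat) :
    pvRead (pvSet2 M a b) p q = if p = a ∧ q = b then true else pvRead M p q := by
  unfold pvRead pvSet2
  have hrowlen : (M.getD a []).length = m := getD_length_of_shape h a ha
  rw [pvGetD_set]
  by_cases hpa : a = p ∧ a < M.length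
  · obtain ⟨rfl, _⟩ := hpa
    rw [if_pos ⟨rfl, by omega⟩, pvGetD_set]
    by_cases hqb : b = q ∧ b < (M.getD a []).length
    · obtain ⟨rfl, _⟩ := hqb
      rw [if_pos ⟨rfl, by omega⟩, if_pos ⟨rfl, rfl⟩]
    · have : ¬ (b = q) := fun hq => hqb ⟨hq, by omega⟩
      rw [if_neg hqb, if_neg (by tauto)]
  · have hMlen : M.length = m := h.1
    have : ¬ (a = p) := fun hq => hpa ⟨hq, by omega⟩
    rw [if_neg hpa, if_neg (by tauto)]

lemma fold_inner (m p : Nat) (hp : p < m) (ids : List Nat) (hids : ∀ x ∈ ids, x < m) :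
    ∀ M, pvShape M m →
      (pvShape (ids.foldl (fun M q => if p ≠ q then pvSet2 M p q else M) M) m ∧
       ∀ p' q', pvRead (ids.foldl (fun M q => if p ≠ q then pvSet2 M p q else M) M) p' q' = true ↔
         pvRead M p' q' = true ∨ (p' = p ∧ q' ∈ ids ∧ q' ≠ p)) := by
  induction ids with
  | nil => intro M hM; simpa using hM
  | cons q ids ih =>
    intro M hM
    rw [List.foldl_cons]
    have hq : q < m := hids q (by simp)
    have hstep : pvShape (if p ≠ q then pvSet2 M p q else M) m := by
      split_ifs
      · exact shape_pvSet2 hM p q hp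
      · exact hM
    obtain ⟨ihs, ihr⟩ := ih (fun x hx => hids x (by simp [hx])) _ hstep
    refine ⟨ihs, ?_⟩
    intro p' q'
    rw [ihr p' q']
    by_cases hpq : p ≠ q
    · rw [if_pos hpq, pvRead_pvSet2 hM p q hp hq]
      by_cases hh : p' = p ∧ q' = q
      · rw [if_pos hh]
        constructor
        · intro _
          right
          exact ⟨hh.1, by simp [hh.2], by rw [hh.2]; exact fun h' => hpq h'.symm⟩
        · intro _; left; rfl
      · rw [if_neg hh]
        constructor
        · rintro (h | ⟨rfl, h1, h2⟩)
          · left; exact h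
          · right; exact ⟨rfl, by simp [h1], h2⟩
        · rintro (h | ⟨rfl, h1, h2⟩)
          · left; exact h
          · rcases List.mem_cons.mp h1 with rfl | h1
            · exact absurd ⟨rfl, rfl⟩ hh
            · right; exact ⟨rfl, h1, h2⟩
    · rw [if_neg hpq]
      obtain rfl := not_not.mp hpq
      constructor
      · rintro (h | ⟨rfl, h1, h2⟩)
        · left; exact h
        · right; exact ⟨rfl, by simp [h1], h2⟩
      · rintro (h | ⟨rfl, h1, h2⟩)
        · left; exact h
        · rcases List.mem_cons.mp h1 with rfl | h1
          · exact absurd rfl h2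
          · right; exact ⟨rfl, h1, h2⟩

lemma fold_douter (m : Nat) (ids : List Nat) (hids : ∀ x ∈ ids, x < m) :
    ∀ (l : List Nat), (∀ x ∈ l, x < m) →
    ∀ M, pvShape M m →
      (pvShape (l.foldl (fun M p =>
          ids.foldl (fun M q => if p ≠ q then pvSet2 M p q else M) M) M) m ∧
       ∀ p' q', pvRead (l.foldl (fun M p =>
          ids.foldl (fun M q => if p ≠ q then pvSet2 M p q else M) M) M) p' q' = true ↔
         pvRead M p' q' = true ∨ (p' ∈ l ∧ q' ∈ ids ∧ p' ≠ q')) := by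
  intro l
  induction l with
  | nil => intro _ M hM; simpa using hM
  | cons p l ih =>
    intro hl M hM
    rw [List.foldl_cons]
    have hp : p < m := hl p (by simp)
    obtain ⟨hs1, hr1⟩ := fold_inner m p hp ids hids M hM
    obtain ⟨ihs, ihr⟩ := ih (fun x hx => hl x (by simp [hx])) _ hs1
    refine ⟨ihs, ?_⟩
    intro p' q'
    rw [ihr p' q', hr1 p' q']
    constructor
    · rintro ((h | ⟨rfl, h1, h2⟩) | ⟨h1, h2, h3⟩)
      · left; exact h
      · right; exact ⟨by simp, h1, fun he => h2 he.symm⟩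
      · right; exact ⟨by simp [h1], h2, h3⟩
    · rintro (h | ⟨h1, h2, h3⟩)
      · left; left; exact h
      · rcases List.mem_cons.mp h1 with rfl | h1
        · left; right; exact ⟨rfl, h2, fun he => h3 he.symm⟩
        · right; exact ⟨h1, h2, h3⟩

lemma fold_all (m : Nat) (incl : List (List Nat))
    (h : ∀ ids ∈ incl, ∀ x ∈ ids, x < m) :
    ∀ M, pvShape M m →
      (pvShape (incl.foldl (fun M ids =>
          ids.foldl (fun M p =>
            ids.foldl (fun M q => if p ≠ q then pvSet2 M p q else M) M) M) M) m ∧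
       ∀ p' q', pvRead (incl.foldl (fun M ids =>
          ids.foldl (fun M p =>
            ids.foldl (fun M q => if p ≠ q then pvSet2 M p q else M) M) M) M) p' q' = true ↔
         pvRead M p' q' = true ∨ ∃ ids ∈ incl, p' ∈ ids ∧ q' ∈ ids ∧ p' ≠ q') := by
  induction incl with
  | nil => intro M hM; simpa using hM
  | cons ids incl ih =>
    intro M hM
    rw [List.foldl_cons]
    have hids : ∀ x ∈ ids, x < m := h ids (by simp)
    obtain ⟨hs1, hr1⟩ := fold_douter m ids hids ids hids M hM
    obtain ⟨ihs, ihr⟩ := ih (fun i hi => h i (by simp [hi])) _ hs1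
    refine ⟨ihs, ?_⟩
    intro p' q'
    rw [ihr p' q', hr1 p' q']
    constructor
    · rintro ((h' | ⟨h1, h2, h3⟩) | ⟨ids', h1, h2⟩)
      · left; exact h'
      · right; exact ⟨ids, by simp, h1, h2, h3⟩
      · right; exact ⟨ids', by simp [h1], h2⟩
    · rintro (h' | ⟨ids', h1, h2⟩)
      · left; left; exact h'
      · rcases List.mem_cons.mp h1 with rfl | h1
        · left; right; exact h2
        · right; exact ⟨ids', h1, h2⟩

-- ---------- share-a-vertex Bool ----------

lemma share_iff (e f : Nat × Nat) :
    (!(PySem.Set.inter (PySem.Set.ofList [e.1, e.2]) (PySem.Set.ofList [f.1, f.2])).isEmpty) = true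
      ↔ (e.1 = f.1 ∨ e.1 = f.2 ∨ e.2 = f.1 ∨ e.2 = f.2) := by
  rw [Bool.not_eq_eq_eq_not, Bool.not_true, List.isEmpty_eq_false_iff_exists_mem]
  constructor
  · rintro ⟨x, hx⟩
    have := (PySem.Set.mem_inter _ _ _).mp hx
    simp only [PySem.Set.mem_ofList, List.mem_cons, List.not_mem_nil, or_false] at this
    rcases this with ⟨h1 | h1, h2 | h2⟩ <;> subst h1 <;> tauto
  · intro h
    have : ∃ v, v ∈ [e.1, e.2] ∧ v ∈ [f.1, f.2] := by
      rcases h with h | h | h | h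
      exacts [⟨e.1, by simp [h]⟩, ⟨e.1, by simp [h]⟩, ⟨e.2, by simp [h]⟩, ⟨e.2, by simp [h]⟩]
    obtain ⟨v, hv1, hv2⟩ := this
    exact ⟨v, (PySem.Set.mem_inter _ _ _).mpr
      ⟨(PySem.Set.mem_ofList _ _).mpr hv1, (PySem.Set.mem_ofList _ _).mpr hv2⟩⟩

-- ---------- assembly ----------

lemma pvGetD_replicate {α : Type} (n v : Nat) (a d : α) :
    (List.replicate n a).getD v d = if v < n then a else d := by
  rw [List.getD_eq_getElem?_getD, List.getElem?_replicate]
  split_ifs <;> rfl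

lemma pvRead_M0 (m p q : Nat) :
    pvRead (List.replicate m (List.replicate m false)) p q = false := by
  unfold pvRead
  rw [pvGetD_replicate]
  split_ifs
  · rw [pvGetD_replicate]; split_ifs <;> rfl
  · rfl

lemma getD_replicate_nil (n v : Nat) :
    (List.replicate n ([] : List Nat)).getD v [] = [] := by
  rw [pvGetD_replicate]; split_ifs <;> rfl

-- ===== VERDICT =====
theorem solution_spec : Claim_equal_solution := by
  intro rr _ _
  unfold Spec_solution
  simp only [solution, solution_alt]
  rw [edges_A rr, edges_B rr]
  set E := pvEdges rr rr.length with hE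
  have hEmem : ∀ e ∈ E, e.1 ≤ e.2 ∧ e.2 < rr.length := by
    intro e he
    have := (mem_pvEdges rr rr.length e).mp he
    exact ⟨this.2.1, this.2.2.1⟩
  have hnodup : E.Nodup := nodup_pvEdges rr
  obtain ⟨hinclen, hincmem⟩ := inc_char E 0 (List.replicate rr.length ([] : List Nat))
    (by
      intro e he
      have := hEmem e he
      simp only [List.length_replicate]
      omega)
  set inc := (E.zipIdx.foldl (fun inc ep =>
    let inc1 := pvAppendAt inc ep.1.1 ep.2
    if ep.1.2 ≠ ep.1.1 then pvAppendAt inc1 ep.1.2 ep.2 else inc1)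
    (List.replicate rr.length ([] : List Nat))) with hinc
  have hge : ∀ (v q : Nat), q ∈ inc.getD v [] ↔
      ∃ h : q < E.length, (E[q].1 = v ∨ E[q].2 = v) := by
    intro v q
    rw [hincmem v q, getD_replicate_nil]
    simp only [List.not_mem_nil, false_or, Nat.zero_add]
    constructor
    · rintro ⟨i, hi, rfl, h⟩; exact ⟨hi, h⟩
    · rintro ⟨hq, h⟩; exact ⟨q, hq, rfl, h⟩
  have hidslt : ∀ ids ∈ inc, ∀ x ∈ ids, x < E.length := by
    intro ids hids x hx
    obtain ⟨v, hv, rfl⟩ := List.mem_iff_getElem.mp hids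
    rw [← List.getD_eq_getElem inc [] hv] at hx
    obtain ⟨h, _⟩ := (hge v x).mp hx
    exact h
  obtain ⟨hshape, hread⟩ := fold_all E.length inc hidslt
    (List.replicate E.length (List.replicate E.length false))
    ⟨by simp, by intro row hrow; rw [List.eq_of_mem_replicate hrow]; simp⟩
  apply List.ext_getElem (by rw [List.length_map, hshape.1])
  intro p hp1 hp2
  rw [List.getElem_map]
  have hpm : p < E.length := by simpa using hp1
  apply List.ext_getElem
    (by rw [List.length_map, hshape.2 _ (List.getElem_mem hp2)])
  intro q hq1 hq2
  rw [List.getElem_map]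
  have hqm : q < E.length := by simpa using hq1
  have hentry : (List.foldl (fun M ids =>
      ids.foldl (fun M p =>
        ids.foldl (fun M q => if p ≠ q then pvSet2 M p q else M) M) M)
      (List.replicate E.length (List.replicate E.length false)) inc)[p][q]
      = pvRead (List.foldl (fun M ids =>
      ids.foldl (fun M p =>
        ids.foldl (fun M q => if p ≠ q then pvSet2 M p q else M) M) M)
      (List.replicate E.length (List.replicate E.length false)) inc) p q := by
    unfold pvRead
    rw [List.getD_eq_getElem _ _ hp2, List.getD_eq_getElem _ _ hq2]
  rw [hentry, Bool.eq_iff_iff, hread p q, pvRead_M0]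
  simp only [Bool.and_eq_true, decide_eq_true_eq, share_iff, Bool.false_eq_true, false_or]
  constructor
  · rintro ⟨hne, hsh⟩
    have hpq : p ≠ q := by
      rintro rfl; exact hne rfl
    have hep := hEmem E[p] (List.getElem_mem hpm)
    obtain ⟨v, hv1, hv2⟩ : ∃ v, (E[p].1 = v ∨ E[p].2 = v) ∧ (E[q].1 = v ∨ E[q].2 = v) := by
      rcases hsh with h | h | h | h
      exacts [⟨E[q].1, Or.inl h, Or.inl rfl⟩, ⟨E[q].2, Or.inl h, Or.inr rfl⟩,
        ⟨E[q].1, Or.inr h, Or.inl rfl⟩, ⟨E[q].2, Or.inr h, Or.inr rfl⟩]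
    have hvn : v < rr.length := by rcases hv1 with h | h <;> omega
    have hvlen : v < inc.length := by rw [hinclen, List.length_replicate]; exact hvn
    refine ⟨inc.getD v [], ?_, (hge v p).mpr ⟨hpm, hv1⟩, (hge v q).mpr ⟨hqm, hv2⟩, hpq⟩
    rw [List.getD_eq_getElem inc [] hvlen]
    exact List.getElem_mem hvlen
  · rintro ⟨ids, hids, hpin, hqin, hpq⟩
    obtain ⟨v, hv, rfl⟩ := List.mem_iff_getElem.mp hids
    rw [← List.getD_eq_getElem inc [] hv] at hpin hqin
    obtain ⟨_, hv1⟩ := (hge v p).mp hpin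
    obtain ⟨_, hv2⟩ := (hge v q).mp hqin
    refine ⟨?_, ?_⟩
    · intro heq
      exact hpq ((hnodup.getElem_inj_iff).mp heq)
    · rcases hv1 with h1 | h1 <;> rcases hv2 with h2 | h2 <;> omega
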